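-- pv_equiv track=rewrite | github.com/DonnyWhoLovedBowling/aoc2020 | src/ex14.py | val_variations
-- ===== SOURCE A (Python) =====
-- from math import pow
-- from copy import deepcopy as dc
--
-- def val_variations(var):
--     xs = var.count('X')
--     n_max = int(pow(2, xs))
--     replacements = [str(bin(b)).replace('b', '').zfill(xs)[-1*xs:] for b in range(0, n_max)]
--     variations = []
--
--     for r in replacements:
--         mask_r = dc(var)
--         j = 0
--         for i, m in enumerate(mask_r):
--             if m == 'X':
--                 mask_r[i] = r[j]
--                 j += 1
--         variations.append(mask_r)
--     return variations
-- ===== SOURCE B (Python) =====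
-- def val_variations(var):
--     out = []
--
--     def go(i, acc):
--         if i == len(var):
--             out.append(acc)
--             return
--         m = var[i]
--         if m == 'X':
--             go(i + 1, acc + ['0'])
--             go(i + 1, acc + ['1'])
--         else:
--             go(i + 1, acc + [m])
--
--     go(0, [])
--     return out
-- ===== Notes on version B (the rewrite author's own statement) =====
-- stated objective: alternative
-- what changed: Replaced the binary-counter enumeration (format each b in range(2^x) as a zero-filled bit string, then rescan the whole mask substituting) by recursive backtracking that walks the mask once, branching 0-then-1 at each 'X' and sharing the non-wildcard prefix work.
import Mathlib
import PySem

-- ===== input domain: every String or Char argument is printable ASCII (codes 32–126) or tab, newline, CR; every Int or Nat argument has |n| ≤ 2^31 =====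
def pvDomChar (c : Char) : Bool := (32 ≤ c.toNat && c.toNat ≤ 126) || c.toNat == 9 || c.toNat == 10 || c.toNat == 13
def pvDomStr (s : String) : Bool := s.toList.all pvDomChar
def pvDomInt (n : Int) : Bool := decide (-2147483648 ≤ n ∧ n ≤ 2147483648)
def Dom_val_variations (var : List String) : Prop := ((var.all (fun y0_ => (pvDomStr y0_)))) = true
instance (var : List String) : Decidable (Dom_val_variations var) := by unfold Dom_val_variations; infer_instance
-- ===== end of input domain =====

-- B replaces A's binary-counter enumeration (zero-filled bit strings + full rescans) by
-- recursive backtracking over the mask, branching '0' then '1' at each 'X' (objective: alternative).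

-- ===== PORT A =====

-- minimal binary digits of b, most significant first (empty for b = 0); the recursive core of Python's bin()
def pvBinRec (b : Nat) : List Char :=
  if h : b = 0 then []
  else pvBinRec (b / 2) ++ [if b % 2 = 1 then '1' else '0']
decreasing_by exact Nat.div_lt_self (Nat.pos_of_ne_zero h) (by norm_num)

-- str(bin(b)) for b ≥ 0, as a char list: '0b' followed by the digits ('0b0' for b = 0); exact hand port
def pvBin (b : Nat) : List Char :=
  '0' :: 'b' :: (if b = 0 then ['0'] else pvBinRec b)

-- str(bin(b)).replace('b', '').zfill(xs)[-1*xs:]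
def pvRepl (xs b : Nat) : List Char :=
  PySem.Chars.slice (PySem.Chars.zfill (PySem.Chars.replace (pvBin b) ['b'] []) xs)
    (some (-(xs : Int))) none

-- one step of "for i, m in enumerate(mask_r): if m == 'X': mask_r[i] = r[j]; j += 1";
-- only position i itself is mutated at step i, so reading the current list at i is the enumerate read.
-- The pyGet? indices are always in range here, so .getD never supplies its default.
def pvSubstStep (r : List Char) (st : List String × Nat) (i : Nat) : List String × Nat :=
  let m := (PySem.List.pyGet? st.1 (i : Int)).getD ""
  if m = "X" then
    (st.1.set i (String.mk [(PySem.List.pyGet? r (st.2 : Int)).getD ' ']), st.2 + 1)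
  else st

def val_variations (var : List String) : List (List String) :=
  let xs := PySem.List.count var "X"
  let n_max : Int := (2 : Int) ^ xs          -- int(pow(2, xs)); exact for the powers reached
  let replacements := (PySem.List.pyRange 0 n_max 1).map (fun b => pvRepl xs b.toNat)  -- b ≥ 0 in range
  let variations : List (List String) := []
  replacements.foldl
    (fun variations r =>
      variations ++ [((List.range var.length).foldl (pvSubstStep r) (var, 0)).1])
    variations

-- ===== PORT B =====

-- go(i, acc): consume the mask position by position (structural recursion over the remaining
-- suffix), threading the output list `out`; '0' branch first, then '1', like Source B.
def pvGo (rest : List String) (acc : List String) (out : List (List String)) : List (List String) :=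
  match rest with
  | [] => out ++ [acc]
  | m :: rest' =>
    if m = "X" then pvGo rest' (acc ++ ["1"]) (pvGo rest' (acc ++ ["0"]) out)
    else pvGo rest' (acc ++ [m]) out

def val_variations_alt (var : List String) : List (List String) :=
  pvGo var [] []

-- ===== PRECONDITION & SPEC =====
def Spec_val_variations (var : List String) (out : List (List String)) : Prop := out = val_variations_alt var
instance (var : List String) (out : List (List String)) : Decidable (Spec_val_variations var out) := by unfold Spec_val_variations; infer_instance

-- ===== CLAIM (what is proved, stated in full; the proofs are below) =====
def Claim_equal_val_variations : Prop := ∀ (var : List String), Dom_val_variations var → Spec_val_variations var (val_variations var)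

-- ===== LEMMAS AND PROOFS =====

-- the tree of variations, structurally
def pvCore : List String → List (List String)
  | [] => [[]]
  | x :: v =>
    if x = "X" then (pvCore v).map (List.cons "0") ++ (pvCore v).map (List.cons "1")
    else (pvCore v).map (List.cons x)

-- the k low binary digits of b, most significant first
def pvNatL : Nat → Nat → List Char
  | 0, _ => []
  | k + 1, b => pvNatL k (b / 2) ++ [if b % 2 = 1 then '1' else '0']

-- substitution of the chars of r for the 'X's of v, functionally
def pvSubstC : List String → List Char → List String
  | [], _ => []
  | x :: v, r =>
    if x = "X" then String.mk [r.headD ' '] :: pvSubstC v r.tail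
    else x :: pvSubstC v r

-- digits part of bin(b) after removing the 'b'
def pvDigits (b : Nat) : List Char := if b = 0 then ['0'] else pvBinRec b

theorem pvGo_eq (rest : List String) : ∀ (acc : List String) (out : List (List String)),
    pvGo rest acc out = out ++ (pvCore rest).map (fun w => acc ++ w) := by
  induction rest with
  | nil => intro acc out; simp [pvGo, pvCore]
  | cons x v ih =>
    intro acc out
    by_cases hx : x = "X" <;>
      simp [pvGo, pvCore, hx, ih, List.map_map, Function.comp_def, List.append_assoc]

theorem pvAlt_eq (var : List String) : val_variations_alt var = pvCore var := by
  simp [val_variations_alt, pvGo_eq]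

theorem pvFoldl_app {α β : Type} (l : List α) (f : α → β) : ∀ (acc : List β),
    l.foldl (fun a r => a ++ [f r]) acc = acc ++ l.map f := by
  induction l with
  | nil => simp
  | cons x t ih => intro acc; simp [ih]

theorem pvNatL_zero (k : Nat) : pvNatL k 0 = List.replicate k '0' := by
  induction k with
  | zero => rfl
  | succ k ih => simp [pvNatL, ih, List.replicate_succ']

theorem pvNatL_lt (k : Nat) : ∀ b, b < 2 ^ k → pvNatL (k + 1) b = '0' :: pvNatL k b := by
  induction k with
  | zero =>
    intro b hb
    interval_cases b
    rfl
  | succ k ih =>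
    intro b hb
    have h2 : b / 2 < 2 ^ k := by
      have : 2 ^ (k + 1) = 2 * 2 ^ k := by ring
      omega
    show pvNatL (k + 1) (b / 2) ++ _ = '0' :: (pvNatL k (b / 2) ++ _)
    rw [ih (b / 2) h2]
    rfl

theorem pvNatL_ge (k : Nat) : ∀ b, b < 2 ^ k → pvNatL (k + 1) (2 ^ k + b) = '1' :: pvNatL k b := by
  induction k with
  | zero =>
    intro b hb
    interval_cases b
    rfl
  | succ k ih =>
    intro b hb
    have hpow : 2 ^ (k + 1) = 2 * 2 ^ k := by ring
    have hdiv : (2 ^ (k + 1) + b) / 2 = 2 ^ k + b / 2 := by omega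
    have hmod : (2 ^ (k + 1) + b) % 2 = b % 2 := by omega
    have h2 : b / 2 < 2 ^ k := by omega
    show pvNatL (k + 1) ((2 ^ (k + 1) + b) / 2) ++ [if (2 ^ (k + 1) + b) % 2 = 1 then '1' else '0']
        = '1' :: (pvNatL k (b / 2) ++ [if b % 2 = 1 then '1' else '0'])
    rw [hdiv, hmod, ih (b / 2) h2]
    rfl

-- replace(…, 'b', '') is a filter removing 'b'
theorem pvReplace_go_b (fuel : Nat) : ∀ (l acc : List Char), l.length ≤ fuel →
    PySem.Chars.replace.go ['b'] [] fuel l acc = acc.reverse ++ l.filter (fun c => c ≠ 'b') := by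
  induction fuel with
  | zero =>
    intro l acc h
    have : l = [] := by cases l <;> simp_all
    subst this
    rw [PySem.Chars.replace.go.eq_1]
    simp
  | succ fuel ih =>
    intro l acc h
    cases l with
    | nil =>
      rw [PySem.Chars.replace.go.eq_2 _ _ _ _ (by omega)]
      simp
    | cons c t =>
      rw [PySem.Chars.replace.go.eq_3]
      by_cases hc : c = 'b'
      · subst hc
        rw [if_pos (by simp [List.isPrefixOf])]
        rw [show List.drop (['b'] : List Char).length ('b' :: t) = t from rfl]
        rw [show (([] : List Char)).reverse ++ acc = acc from rfl]
        rw [ih t acc (by simpa using h)]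
        simp
      · rw [if_neg (by simp [List.isPrefixOf]; exact fun h' => hc h'.symm)]
        rw [ih t (c :: acc) (by simpa using h)]
        simp [hc]

theorem pvReplace_b (s : List Char) :
    PySem.Chars.replace s ['b'] [] = s.filter (fun c => c ≠ 'b') := by
  show (if _ then _ else _) = _
  rw [if_neg (by simp)]
  simpa using pvReplace_go_b s.length s [] le_rfl

theorem pvBinRec_chars (b : Nat) : ∀ c ∈ pvBinRec b, c = '0' ∨ c = '1' := by
  induction b using Nat.strong_induction_on with
  | _ b ih =>
    intro c hc
    by_cases hb : b = 0
    · rw [pvBinRec, dif_pos hb] at hc; simp at hc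
    · rw [pvBinRec, dif_neg hb] at hc
      rcases List.mem_append.1 hc with h | h
      · exact ih (b / 2) (Nat.div_lt_self (Nat.pos_of_ne_zero hb) (by norm_num)) c h
      · simp at h; split at h <;> simp [h]

theorem pvDigits_chars (b : Nat) : ∀ c ∈ pvDigits b, c = '0' ∨ c = '1' := by
  intro c hc
  unfold pvDigits at hc
  split at hc
  · simp at hc; simp [hc]
  · exact pvBinRec_chars b c hc

theorem pvReplace_bin (b : Nat) :
    PySem.Chars.replace (pvBin b) ['b'] [] = '0' :: pvDigits b := by
  rw [pvReplace_b]
  show List.filter _ ('0' :: 'b' :: pvDigits b) = _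
  simp [List.filter_cons]
  intro a ha
  rcases pvDigits_chars b a ha with h | h <;> simp [h]

theorem pvBinRec_len (b : Nat) : ∀ k, b < 2 ^ k → (pvBinRec b).length ≤ k := by
  induction b using Nat.strong_induction_on with
  | _ b ih =>
    intro k hk
    by_cases hb : b = 0
    · rw [pvBinRec, dif_pos hb]; simp
    · rw [pvBinRec, dif_neg hb]
      have hk1 : 1 ≤ k := by
        by_contra h
        have : k = 0 := by omega
        subst this
        simp only [pow_zero] at hk
        omega
      obtain ⟨k', rfl⟩ : ∃ k', k = k' + 1 := ⟨k - 1, by omega⟩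
      have hb2 : b / 2 < 2 ^ k' := by
        have : 2 ^ (k' + 1) = 2 * 2 ^ k' := by ring
        omega
      have := ih (b / 2) (Nat.div_lt_self (Nat.pos_of_ne_zero hb) (by norm_num)) k' hb2
      rw [List.length_append]
      simp only [List.length_cons, List.length_nil]
      omega

theorem pvDigits_len (b k : Nat) (hk : 1 ≤ k) (hb : b < 2 ^ k) : (pvDigits b).length ≤ k := by
  unfold pvDigits
  split
  · simpa
  · exact pvBinRec_len b k hb

-- zfill pads with '0' on the left (the head is a digit here, never a sign)
theorem pvZfill_eq (d : List Char) (k : Nat) :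
    PySem.Chars.zfill ('0' :: d) (k : Int) = List.replicate (k - (d.length + 1)) '0' ++ '0' :: d := by
  unfold PySem.Chars.zfill
  by_cases hle : (k : Int) ≤ (('0' :: d).length : Int)
  · rw [if_pos hle]
    simp only [List.length_cons] at hle
    rw [show k - (d.length + 1) = 0 by omega]
    simp
  · rw [if_neg hle]
    show (if ('0' : Char) = '+' ∨ ('0' : Char) = '-' then
            ('0' : Char) :: (List.replicate (((k : Int)).toNat - ('0' :: d).length) '0' ++ d)
          else List.replicate (((k : Int)).toNat - ('0' :: d).length) '0' ++ '0' :: d)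
        = List.replicate (k - (d.length + 1)) '0' ++ '0' :: d
    rw [if_neg (by decide)]
    simp only [List.length_cons, Int.toNat_natCast]

theorem pvRepl_pad (k b : Nat) (hk : 1 ≤ k) (hb : b < 2 ^ k) :
    pvRepl k b = List.replicate (k - (pvDigits b).length) '0' ++ pvDigits b := by
  have hlen : (pvDigits b).length ≤ k := pvDigits_len b k hk hb
  unfold pvRepl
  rw [pvReplace_bin, pvZfill_eq]
  set d := pvDigits b with hd
  set n := d.length with hn
  simp only [PySem.Chars.slice_eq_listSlice]
  rw [PySem.List.slice_from_neg_natCast _ k hk]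
  by_cases hcase : n + 1 ≤ k
  · rw [show (List.replicate (k - (n + 1)) '0' ++ '0' :: d).length - k = 0 by
      simp only [List.length_append, List.length_replicate, List.length_cons]
      omega]
    rw [List.drop_zero]
    rw [show k - n = (k - (n + 1)) + 1 by omega, List.replicate_succ', List.append_assoc]
    rfl
  · have hkn : k = n := by omega
    rw [show k - (n + 1) = 0 by omega]
    simp only [List.replicate_zero, List.nil_append, List.length_cons]
    rw [show n + 1 - k = 1 by omega, show k - n = 0 by omega]
    simp

-- the left-zero-padded minimal digits are exactly the k low binary digits
theorem pvPad_natL (k : Nat) : ∀ b, b < 2 ^ (k + 1) →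
    List.replicate ((k + 1) - (pvDigits b).length) '0' ++ pvDigits b = pvNatL (k + 1) b := by
  induction k with
  | zero =>
    intro b hb
    have h0 : pvBinRec 0 = [] := by rw [pvBinRec]; norm_num
    have h1 : pvBinRec 1 = ['1'] := by rw [pvBinRec]; norm_num [h0]
    interval_cases b <;> norm_num [pvDigits, pvNatL, h0, h1]
  | succ k ih =>
    intro b hb
    by_cases hb0 : b = 0
    · subst hb0
      rw [pvNatL_zero, show pvDigits 0 = ['0'] from by norm_num [pvDigits]]
      simp only [List.length_cons, List.length_nil]
      rw [show k + 1 + 1 - (0 + 1) = k + 1 by omega, ← List.replicate_succ']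
    · have hrec : pvBinRec b = pvBinRec (b / 2) ++ [if b % 2 = 1 then '1' else '0'] := by
        rw [pvBinRec]; simp [hb0]
      have hdig : pvDigits b = pvBinRec (b / 2) ++ [if b % 2 = 1 then '1' else '0'] := by
        rw [pvDigits, if_neg hb0, hrec]
      by_cases hb1 : b / 2 = 0
      · have hb1' : b = 1 := by omega
        subst hb1'
        rw [hdig]
        rw [show pvBinRec (1 / 2) = [] by rw [pvBinRec]; norm_num]
        show List.replicate (k + 1 + 1 - 1) '0' ++ ['1'] = pvNatL (k + 1) (1 / 2) ++ _
        rw [show (1 : Nat) / 2 = 0 by norm_num, pvNatL_zero]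
        norm_num
      · have hlt : b / 2 < 2 ^ (k + 1) := by
          have : 2 ^ (k + 1 + 1) = 2 * 2 ^ (k + 1) := by ring
          omega
        have IH := ih (b / 2) hlt
        rw [pvDigits, if_neg hb1] at IH
        rw [hdig]
        show List.replicate _ '0' ++ _ = pvNatL (k + 1) (b / 2) ++ [if b % 2 = 1 then '1' else '0']
        rw [← IH, List.length_append]
        simp only [List.length_cons, List.length_nil]
        rw [show k + 1 + 1 - ((pvBinRec (b / 2)).length + 1) = k + 1 - (pvBinRec (b / 2)).length by
          omega]
        rw [List.append_assoc]

-- fold over the index range performs the functional substitution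
theorem pvSubst_fold (r : List Char) : ∀ (v done : List String) (j : Nat),
    (List.range' done.length v.length 1).foldl (pvSubstStep r) (done ++ v, j)
      = (done ++ pvSubstC v (r.drop j), j + PySem.List.count v "X") := by
  intro v
  induction v with
  | nil => intro done j; simp [pvSubstC, PySem.List.count]
  | cons x v ih =>
    intro done j
    rw [show (x :: v).length = v.length + 1 from rfl, List.range'_succ]
    have hget : (PySem.List.pyGet? (done ++ x :: v) (done.length : Int)).getD "" = x := by
      rw [PySem.List.pyGet?_natCast]
      rw [List.getElem?_append_right le_rfl]
      simp
    by_cases hx : x = "X"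
    · subst hx
      show (List.range' (done.length + 1) v.length 1).foldl (pvSubstStep r)
          (pvSubstStep r (done ++ "X" :: v, j) done.length) = _
      rw [show pvSubstStep r (done ++ "X" :: v, j) done.length
          = (done ++ String.mk [(PySem.List.pyGet? r (j : Int)).getD ' '] :: v, j + 1) by
        simp only [pvSubstStep, hget, ite_true, if_true, eq_self_iff_true]
        rw [List.set_append_right _ _ le_rfl]
        simp]
      have hih := ih (done ++ [String.mk [(PySem.List.pyGet? r (j : Int)).getD ' ']]) (j + 1)
      rw [List.append_assoc] at hih
      simp only [List.singleton_append] at hih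
      simp only [List.length_append, List.length_cons, List.length_nil] at hih ⊢
      rw [show done.length + 1 = done.length + 1 + 0 by omega] at hih ⊢
      have hr : (PySem.List.pyGet? r (j : Int)).getD ' ' = (r.drop j).headD ' ' := by
        rw [PySem.List.pyGet?_natCast, List.headD_eq_head?_getD, List.head?_drop]
      rw [hih, show pvSubstC ("X" :: v) (r.drop j)
          = String.mk [(r.drop j).headD ' '] :: pvSubstC v (r.drop j).tail from by
        simp [pvSubstC]]
      rw [List.tail_drop, ← hr]
      simp only [PySem.List.count, List.count_cons, List.singleton_append, List.append_assoc,
        Prod.mk.injEq]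
      refine ⟨by simp, by simp; omega⟩
    · show (List.range' (done.length + 1) v.length 1).foldl (pvSubstStep r)
          (pvSubstStep r (done ++ x :: v, j) done.length) = _
      rw [show pvSubstStep r (done ++ x :: v, j) done.length = (done ++ x :: v, j) by
        simp [pvSubstStep, hget, hx]]
      have hih := ih (done ++ [x]) j
      rw [List.append_assoc] at hih
      simp only [List.singleton_append] at hih
      simp only [List.length_append, List.length_cons, List.length_nil] at hih ⊢
      rw [show done.length + 1 = done.length + 1 + 0 by omega] at hih ⊢
      rw [hih]
      simp [pvSubstC, PySem.List.count, List.count_cons, hx]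

theorem pvSubstC_noX (v : List String) (h : PySem.List.count v "X" = 0) :
    ∀ r, pvSubstC v r = v := by
  induction v with
  | nil => intro r; rfl
  | cons x v ih =>
    intro r
    have hx : x ≠ "X" := by
      intro hx; subst hx
      simp [PySem.List.count, List.count_cons] at h
    have hv : PySem.List.count v "X" = 0 := by
      simp only [PySem.List.count, List.count_cons] at h ⊢
      omega
    simp [pvSubstC, hx, ih hv]

theorem pvCore_noX (v : List String) (h : PySem.List.count v "X" = 0) : pvCore v = [v] := by
  induction v with
  | nil => rfl
  | cons x v ih =>
    have hx : x ≠ "X" := by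
      intro hx; subst hx; simp [PySem.List.count, List.count_cons] at h
    have hv : PySem.List.count v "X" = 0 := by
      simp only [PySem.List.count, List.count_cons] at h ⊢; omega
    simp [pvCore, hx, ih hv]

theorem pvSubstC_cons_X (v : List String) (c : Char) (w : List Char) :
    pvSubstC ("X" :: v) (c :: w) = String.mk [c] :: pvSubstC v w := by
  simp [pvSubstC]

theorem pvMain_map (v : List String) : ∀ k, PySem.List.count v "X" = k →
    (List.range (2 ^ k)).map (fun b => pvSubstC v (pvNatL k b)) = pvCore v := by
  induction v with
  | nil =>
    intro k hk
    simp only [PySem.List.count, List.count_nil] at hk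
    subst hk
    simp [pvSubstC, pvCore, List.range_succ]
  | cons x v ih =>
    intro k hk
    by_cases hx : x = "X"
    · subst hx
      simp only [PySem.List.count, List.count_cons] at hk ih
      obtain ⟨c, rfl⟩ : ∃ c, k = c + 1 := ⟨k - 1, by simp at hk; omega⟩
      have hc : List.count "X" v = c := by simp at hk; omega
      have hstep : 2 ^ (c + 1) = 2 ^ c + 2 ^ c := by ring
      rw [hstep, List.range_add, List.map_append, List.map_map]
      have h1 : (List.range (2 ^ c)).map (fun b => pvSubstC ("X" :: v) (pvNatL (c + 1) b))
          = (List.range (2 ^ c)).map (fun b => "0" :: pvSubstC v (pvNatL c b)) := by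
        apply List.map_congr_left
        intro b hb
        rw [pvNatL_lt c b (List.mem_range.1 hb), pvSubstC_cons_X]
        rfl
      have h2 : (List.range (2 ^ c)).map
            ((fun b => pvSubstC ("X" :: v) (pvNatL (c + 1) b)) ∘ (fun b => 2 ^ c + b))
          = (List.range (2 ^ c)).map (fun b => "1" :: pvSubstC v (pvNatL c b)) := by
        apply List.map_congr_left
        intro b hb
        simp only [Function.comp_apply]
        rw [pvNatL_ge c b (List.mem_range.1 hb), pvSubstC_cons_X]
        rfl
      rw [h1, h2]
      have hv := ih c hc
      simp [pvCore, ← hv, List.map_map, Function.comp_def]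
    · have hk' : PySem.List.count v "X" = k := by
        simpa [PySem.List.count, List.count_cons, hx] using hk
      have hcons : ∀ b, pvSubstC (x :: v) (pvNatL k b) = x :: pvSubstC v (pvNatL k b) := by
        intro b; simp [pvSubstC, hx]
      simp only [hcons]
      rw [show (List.range (2 ^ k)).map (fun b => x :: pvSubstC v (pvNatL k b))
          = ((List.range (2 ^ k)).map (fun b => pvSubstC v (pvNatL k b))).map (List.cons x) by
        simp [List.map_map, Function.comp_def]]
      rw [ih k hk']
      simp [pvCore, hx]

theorem pvA_unfold (var : List String) (k : Nat) (hk : PySem.List.count var "X" = k) :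
    val_variations var = (List.range (2 ^ k)).map (fun b => pvSubstC var (pvRepl k b)) := by
  unfold val_variations
  rw [hk, pvFoldl_app, PySem.List.pyRange_one]
  simp only [List.nil_append, List.map_map, sub_zero]
  rw [show ((2 : Int) ^ k).toNat = 2 ^ k by
    rw [show ((2 : Int) ^ k) = ((2 ^ k : Nat) : Int) by push_cast; ring]
    exact Int.toNat_natCast _]
  apply List.map_congr_left
  intro b hb
  simp only [Function.comp_apply, zero_add, Int.toNat_natCast]
  have hfold := pvSubst_fold (pvRepl k b) var [] 0
  simp only [List.length_nil, List.nil_append, List.drop_zero, zero_add] at hfold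
  rw [List.range_eq_range', hfold]

-- ===== VERDICT (by name: the statement is the Claim_ definition above) =====
theorem val_variations_spec : Claim_equal_val_variations := by
  intro var _
  unfold Spec_val_variations
  rw [pvAlt_eq]
  by_cases h0 : PySem.List.count var "X" = 0
  · rw [pvA_unfold var 0 h0, pvCore_noX var h0]
    simp [List.range_one, pvSubstC_noX var h0]
  · obtain ⟨c, hc⟩ : ∃ c, PySem.List.count var "X" = c + 1 :=
      ⟨PySem.List.count var "X" - 1, by omega⟩
    rw [pvA_unfold var (c + 1) hc, ← pvMain_map var (c + 1) hc]
    apply List.map_congr_left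
    intro b hb
    rw [pvRepl_pad (c + 1) b (by omega) (List.mem_range.1 hb)]
    rw [pvPad_natL c b (List.mem_range.1 hb)]
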